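-- pv_equiv track=rewrite | github.com/janek37/advent-of-code | 2021/day15.py | low_total_risk_map
-- ===== SOURCE A (Python) =====
-- def low_total_risk_map(cave, previous_risk_map=None):
--     risk_map = [[None]*len(cave[0]) for _ in cave]
--     for y in range(len(cave)-1, -1, -1):
--         for x in range(len(cave[y])-1, -1, -1):
--             options = [risk_map[y1][x1] + cave[y1][x1] for x1, y1 in forward(cave, x, y)]
--             options = options or [0]
--             if previous_risk_map:
--                 options += [previous_risk_map[y1][x1] + cave[y1][x1] for x1, y1 in backward(x, y)]
--             risk_map[y][x] = min(options)
--     return risk_map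
--
-- def forward(cave, x, y):
--     if y+1 < len(cave):
--         yield x, y+1
--     if x+1 < len(cave[0]):
--         yield x+1, y
--
-- def backward(x, y):
--     if y > 0:
--         yield x, y-1
--     if x > 0:
--         yield x-1, y
-- ===== SOURCE B (Python) =====
-- def low_total_risk_map(cave, previous_risk_map=None):
--     memo = {}
--
--     def compute(x, y):
--         # top-down: risk of cell (x, y) from its forward (down/right) neighbours
--         if (x, y) in memo:
--             return memo[(x, y)]
--         best = None
--         if y + 1 < len(cave):
--             best = compute(x, y + 1) + cave[y + 1][x]
--         if x + 1 < len(cave[0]):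
--             right = compute(x + 1, y) + cave[y][x + 1]
--             if best is None or right < best:
--                 best = right
--         if best is None:
--             best = 0
--         if previous_risk_map:
--             if y > 0:
--                 up = previous_risk_map[y - 1][x] + cave[y - 1][x]
--                 if up < best:
--                     best = up
--             if x > 0:
--                 left = previous_risk_map[y][x - 1] + cave[y][x - 1]
--                 if left < best:
--                     best = left
--         memo[(x, y)] = best
--         return best
--
--     # visit rows bottom-up so the memoized recursion never goes deeper than one row
--     result = []
--     for y in reversed(range(len(cave))):
--         result.append([compute(x, y) for x in range(len(cave[0]))])
--     result.reverse()
--     return result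
-- ===== Notes on version B (the rewrite author's own statement) =====
-- stated objective: alternative
-- what changed: B replaces A's bottom-up double loop over a preallocated None matrix by a top-down memoized recursion: compute(x,y) recurses on the down/right neighbours with an (x,y)->risk cache and a running-min accumulator instead of A's options list, and the grid is assembled by querying compute for every cell.
import Mathlib
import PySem

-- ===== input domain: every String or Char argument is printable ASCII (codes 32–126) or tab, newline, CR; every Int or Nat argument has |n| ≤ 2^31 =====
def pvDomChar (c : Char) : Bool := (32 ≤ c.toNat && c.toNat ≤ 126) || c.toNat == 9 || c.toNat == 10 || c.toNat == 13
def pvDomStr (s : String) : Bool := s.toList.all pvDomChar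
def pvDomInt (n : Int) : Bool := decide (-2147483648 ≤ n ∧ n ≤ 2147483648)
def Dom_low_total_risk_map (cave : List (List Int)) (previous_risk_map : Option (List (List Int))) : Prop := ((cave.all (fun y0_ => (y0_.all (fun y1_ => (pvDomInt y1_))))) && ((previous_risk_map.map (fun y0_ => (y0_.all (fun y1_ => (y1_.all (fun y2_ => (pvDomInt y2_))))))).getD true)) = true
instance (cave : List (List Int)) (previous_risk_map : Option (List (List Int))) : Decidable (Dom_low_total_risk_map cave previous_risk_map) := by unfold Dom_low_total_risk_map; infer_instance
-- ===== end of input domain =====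

-- B replaces A's bottom-up double loop over a preallocated None matrix by a top-down memoized
-- recursion on the forward (down/right) neighbours (objective: alternative decomposition).

-- ===== PORT A =====
-- min(options) on a nonempty list (options is never empty in A)
def pyMin (l : List Int) : Int := (PySem.List.min? l (fun v => v)).getD 0

-- the body of A's inner loop: relax cell (x, y) of risk_map rm.
-- Python fills risk_map with None; a read of a still-unfilled cell would raise TypeError and never
-- happens on the rectangular inputs Pre_ admits, so 0 stands in for None (pyGetD defaults likewise
-- stand in for IndexError reads, which Pre_ excludes).
def aCell (cave : List (List Int)) (previous_risk_map : Option (List (List Int))) (y : Int)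
    (rm : List (List Int)) (x : Int) : List (List Int) :=
  let options : List Int :=
    (if y + 1 < PySem.List.len cave then
      [PySem.List.pyGetD (PySem.List.pyGetD rm (y+1) []) x 0 +
       PySem.List.pyGetD (PySem.List.pyGetD cave (y+1) []) x 0] else []) ++
    (if x + 1 < PySem.List.len (PySem.List.pyGetD cave 0 []) then
      [PySem.List.pyGetD (PySem.List.pyGetD rm y []) (x+1) 0 +
       PySem.List.pyGetD (PySem.List.pyGetD cave y []) (x+1) 0] else [])
  let options : List Int := if options = [] then [0] else options
  let options : List Int :=
    match previous_risk_map with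
    | none => options
    | some p =>
      if p = [] then options else
        options ++
          ((if 0 < y then
             [PySem.List.pyGetD (PySem.List.pyGetD p (y-1) []) x 0 +
              PySem.List.pyGetD (PySem.List.pyGetD cave (y-1) []) x 0] else []) ++
           (if 0 < x then
             [PySem.List.pyGetD (PySem.List.pyGetD p y []) (x-1) 0 +
              PySem.List.pyGetD (PySem.List.pyGetD cave y []) (x-1) 0] else []))
  PySem.List.pySetD rm y (PySem.List.pySetD (PySem.List.pyGetD rm y []) x (pyMin options))

def low_total_risk_map (cave : List (List Int)) (previous_risk_map : Option (List (List Int))) : List (List Int) :=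
  let risk_map : List (List Int) :=
    cave.map (fun _ => List.replicate (PySem.List.len (PySem.List.pyGetD cave 0 [])).toNat 0)
  (PySem.List.pyRange (PySem.List.len cave - 1) (-1) (-1)).foldl
    (fun rm y =>
      (PySem.List.pyRange (PySem.List.len (PySem.List.pyGetD cave y []) - 1) (-1) (-1)).foldl
        (aCell cave previous_risk_map y) rm)
    risk_map

-- ===== PORT B =====
-- recursion-depth bound for compute(x, y) (Python recurses without fuel; this bound only
-- makes the same recursion structurally total and is never hit)
def riskMeasure (cave : List (List Int)) (x y : Int) : Nat :=
  (PySem.List.len cave - y).toNat * ((PySem.List.len (PySem.List.pyGetD cave 0 [])).toNat + 1)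
    + (PySem.List.len (PySem.List.pyGetD cave 0 []) - x).toNat

-- compute(x, y): top-down risk of cell (x, y), with the memo dict threaded through (B's mutable dict)
def bComputeF (cave : List (List Int)) (previous_risk_map : Option (List (List Int))) :
    Nat → Int → Int → PySem.Dict (Int × Int) Int → Int × PySem.Dict (Int × Int) Int
  | 0, _, _, memo => (0, memo)   -- unreachable: fuel exceeds the recursion depth
  | Nat.succ fuel, x, y, memo =>
    match PySem.Dict.get? memo (x, y) with
    | some v => (v, memo)
    | none =>
      let st1 : Option Int × PySem.Dict (Int × Int) Int :=
        if y + 1 < PySem.List.len cave then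
          let r := bComputeF cave previous_risk_map fuel x (y + 1) memo
          (some (r.1 + PySem.List.pyGetD (PySem.List.pyGetD cave (y+1) []) x 0), r.2)
        else (none, memo)
      let st2 : Option Int × PySem.Dict (Int × Int) Int :=
        if x + 1 < PySem.List.len (PySem.List.pyGetD cave 0 []) then
          let r := bComputeF cave previous_risk_map fuel (x + 1) y st1.2
          let right := r.1 + PySem.List.pyGetD (PySem.List.pyGetD cave y []) (x+1) 0
          (some (match st1.1 with | none => right | some b => if right < b then right else b), r.2)
        else st1
      -- `if best is None: best = 0`
      let best0 : Int := st2.1.getD 0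
      let best : Int :=
        match previous_risk_map with
        | none => best0
        | some p =>
          if p = [] then best0 else
            let b1 := if 0 < y then
                (let up := PySem.List.pyGetD (PySem.List.pyGetD p (y-1) []) x 0 +
                           PySem.List.pyGetD (PySem.List.pyGetD cave (y-1) []) x 0;
                 if up < best0 then up else best0) else best0
            if 0 < x then
                (let lf := PySem.List.pyGetD (PySem.List.pyGetD p y []) (x-1) 0 +
                           PySem.List.pyGetD (PySem.List.pyGetD cave y []) (x-1) 0;
                 if lf < b1 then lf else b1) else b1
      (best, PySem.Dict.insert st2.2 (x, y) best)

def bCompute (cave : List (List Int)) (previous_risk_map : Option (List (List Int)))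
    (x y : Int) (memo : PySem.Dict (Int × Int) Int) : Int × PySem.Dict (Int × Int) Int :=
  bComputeF cave previous_risk_map (riskMeasure cave x y + 1) x y memo

-- driver: for y in reversed(range(len(cave))): result.append([compute(x, y) for x in range(len(cave[0]))]);
-- result.reverse(); return result
def low_total_risk_map_alt (cave : List (List Int)) (previous_risk_map : Option (List (List Int))) : List (List Int) :=
  let st :=
    ((PySem.List.pyRange 0 (PySem.List.len cave) 1).reverse).foldl
      (fun (st : List (List Int) × PySem.Dict (Int × Int) Int) y =>
        let rowst :=
          (PySem.List.pyRange 0 (PySem.List.len (PySem.List.pyGetD cave 0 [])) 1).foldl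
            (fun (acc : List Int × PySem.Dict (Int × Int) Int) x =>
              let r := bCompute cave previous_risk_map x y acc.2
              (acc.1 ++ [r.1], r.2))
            ([], st.2)
        (st.1 ++ [rowst.1], rowst.2))
      ([], PySem.Dict.empty)
  st.1.reverse

-- ===== PRECONDITION & SPEC =====
-- Pre_ is exactly where Python A returns: cave rectangular (otherwise an unfilled None cell is
-- added to an int (TypeError) or an index is out of range (IndexError)), and a truthy
-- previous_risk_map covers every backward-neighbour index A reads from it (else IndexError).
def Pre_low_total_risk_map (cave : List (List Int)) (previous_risk_map : Option (List (List Int))) : Prop :=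
  (∀ row ∈ cave, row.length = (cave.headD []).length) ∧
  ∀ p ∈ previous_risk_map.toList, p ≠ [] →
    ∀ y < cave.length, ∀ x < (cave.headD []).length,
      (y + 1 < cave.length ∨ x + 1 < (cave.headD []).length) →
      y < p.length ∧ x < (p.getD y []).length
instance (cave : List (List Int)) (previous_risk_map : Option (List (List Int))) : Decidable (Pre_low_total_risk_map cave previous_risk_map) := by unfold Pre_low_total_risk_map; infer_instance

def pvWitness_low_total_risk_map : List (List Int) × Option (List (List Int)) :=
  ([[1, 2], [3, 4]], some [[1, 1], [1, 1]])

def Spec_low_total_risk_map (cave : List (List Int)) (previous_risk_map : Option (List (List Int))) (out : List (List Int)) : Prop := out = low_total_risk_map_alt cave previous_risk_map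
instance (cave : List (List Int)) (previous_risk_map : Option (List (List Int))) (out : List (List Int)) : Decidable (Spec_low_total_risk_map cave previous_risk_map out) := by unfold Spec_low_total_risk_map; infer_instance

-- ===== CLAIM (what is proved, stated in full; the proofs are below) =====
def Claim_equal_low_total_risk_map : Prop := ∀ (cave : List (List Int)) (previous_risk_map : Option (List (List Int))), Dom_low_total_risk_map cave previous_risk_map → Pre_low_total_risk_map cave previous_risk_map → Spec_low_total_risk_map cave previous_risk_map (low_total_risk_map cave previous_risk_map)

-- ===== LEMMAS AND PROOFS =====

-- the common mathematical value of cell (x, y): A's options-list-and-min formulation, with the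
-- neighbours' risks given by recursion
def risk (cave : List (List Int)) (prev : Option (List (List Int))) (x y : Int) : Int :=
  let options : List Int :=
    (if _h1 : y + 1 < PySem.List.len cave then
      [risk cave prev x (y+1) +
       PySem.List.pyGetD (PySem.List.pyGetD cave (y+1) []) x 0] else []) ++
    (if _h2 : x + 1 < PySem.List.len (PySem.List.pyGetD cave 0 []) then
      [risk cave prev (x+1) y +
       PySem.List.pyGetD (PySem.List.pyGetD cave y []) (x+1) 0] else [])
  let options : List Int := if options = [] then [0] else options
  let options : List Int :=
    match prev with
    | none => options
    | some p =>
      if p = [] then options else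
        options ++
          ((if 0 < y then
             [PySem.List.pyGetD (PySem.List.pyGetD p (y-1) []) x 0 +
              PySem.List.pyGetD (PySem.List.pyGetD cave (y-1) []) x 0] else []) ++
           (if 0 < x then
             [PySem.List.pyGetD (PySem.List.pyGetD p y []) (x-1) 0 +
              PySem.List.pyGetD (PySem.List.pyGetD cave y []) (x-1) 0] else []))
  pyMin options
termination_by ((PySem.List.len cave - y).toNat, (PySem.List.len (PySem.List.pyGetD cave 0 []) - x).toNat)
decreasing_by
  · exact Prod.Lex.left _ _ (by omega)
  · exact Prod.Lex.right _ (by omega)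

-- the finished risk row y (suffix from column n on)
def riskSuffix (cave : List (List Int)) (prev : Option (List (List Int))) (y : Int) (n : Nat) : List Int :=
  (List.range ((cave.headD []).length - n)).map (fun k => risk cave prev ((n + k : Nat) : Int) y)

def riskRow (cave : List (List Int)) (prev : Option (List (List Int))) (y : Int) : List Int :=
  riskSuffix cave prev y 0

-- the finished risk rows from row m down
def rowsFrom (cave : List (List Int)) (prev : Option (List (List Int))) (m : Nat) : List (List Int) :=
  (List.range (cave.length - m)).map (fun k => riskRow cave prev ((m + k : Nat) : Int))

theorem getD_append_length {α : Type} (l1 l2 : List α) (d : α) :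
    (l1 ++ l2).getD l1.length d = l2.getD 0 d := by
  induction l1 with
  | nil => rfl
  | cons a t ih => simpa using ih

theorem getD_append_at {α : Type} (l1 l2 : List α) (d : α) (k : Nat) (hk : k = l1.length) :
    (l1 ++ l2).getD k d = l2.getD 0 d := by
  subst hk; exact getD_append_length l1 l2 d

theorem set_append_cons {α : Type} (pre : List α) (c v : α) (suf : List α) (k : Nat)
    (hk : k = pre.length) : (pre ++ c :: suf).set k v = pre ++ v :: suf := by
  subst hk
  induction pre with
  | nil => rfl
  | cons a t ih => simp [ih]

theorem pyMin_cons (x : Int) (t : List Int) : pyMin (x :: t) = t.foldl min x := by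
  rw [pyMin, PySem.List.min?_id_cons]; rfl

theorem riskSuffix_cons (cave : List (List Int)) (prev : Option (List (List Int))) (y : Int)
    (n : Nat) (hn : n < (cave.headD []).length) :
    riskSuffix cave prev y n = risk cave prev (n : Int) y :: riskSuffix cave prev y (n + 1) := by
  rw [riskSuffix, riskSuffix,
      show (cave.headD []).length - n = ((cave.headD []).length - (n + 1)) + 1 by omega,
      List.range_succ_eq_map]
  simp only [List.map_cons, List.map_map]
  refine List.cons_eq_cons.mpr ⟨by norm_num, ?_⟩
  apply List.map_congr_left
  intro k _
  have hk : n + (k + 1) = n + 1 + k := by omega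
  simp only [Function.comp, ← hk]

theorem riskSuffix_last (cave : List (List Int)) (prev : Option (List (List Int))) (y : Int) :
    riskSuffix cave prev y (cave.headD []).length = [] := by
  simp [riskSuffix]

theorem rowsFrom_cons (cave : List (List Int)) (prev : Option (List (List Int)))
    (m : Nat) (hm : m < cave.length) :
    rowsFrom cave prev m = riskRow cave prev (m : Int) :: rowsFrom cave prev (m + 1) := by
  rw [rowsFrom, rowsFrom,
      show cave.length - m = (cave.length - (m + 1)) + 1 by omega,
      List.range_succ_eq_map]
  simp only [List.map_cons, List.map_map]
  refine List.cons_eq_cons.mpr ⟨by norm_num, ?_⟩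
  apply List.map_congr_left
  intro k _
  have hk : m + (k + 1) = m + 1 + k := by omega
  simp only [Function.comp, ← hk]

theorem rowsFrom_last (cave : List (List Int)) (prev : Option (List (List Int))) :
    rowsFrom cave prev cave.length = [] := by
  simp [rowsFrom]

theorem riskRow_get (cave : List (List Int)) (prev : Option (List (List Int))) (y : Int)
    (k : Nat) (hk : k < (cave.headD []).length) :
    PySem.List.pyGetD (riskRow cave prev y) (k : Int) 0 = risk cave prev (k : Int) y := by
  rw [PySem.List.pyGetD_natCast, riskRow, riskSuffix]
  rw [List.getD_eq_getElem _ _ (by simpa using hk)]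
  simp

theorem hw0_eq (cave : List (List Int)) :
    PySem.List.pyGetD cave 0 [] = cave.headD [] := by
  cases cave with
  | nil => simp [PySem.List.pyGetD_zero]
  | cons c t => simp [PySem.List.pyGetD_zero]

-- one inner-loop step of A writes exactly risk (x, y) into the working row
theorem aCell_step (cave : List (List Int)) (prev : Option (List (List Int)))
    (y : Nat) (pre rows : List (List Int)) (hpre : pre.length = y)
    (hbelow : y + 1 < cave.length → rows.head? = some (riskRow cave prev ((y : Int) + 1)))
    (n : Nat) (hn : n < (cave.headD []).length) :
    aCell cave prev (y : Int)
      (pre ++ (List.replicate (n+1) 0 ++ riskSuffix cave prev (y : Int) (n+1)) :: rows) (n : Int)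
    = pre ++ (List.replicate n 0 ++ riskSuffix cave prev (y : Int) n) :: rows := by
  have hW : PySem.List.len (PySem.List.pyGetD cave 0 []) = ((cave.headD []).length : Int) := by
    rw [hw0_eq]; simp [PySem.List.len_eq]
  set cur := List.replicate (n+1) (0:Int) ++ riskSuffix cave prev (y : Int) (n+1) with hcurdef
  have hcur : PySem.List.pyGetD (pre ++ cur :: rows) (y : Int) [] = cur := by
    rw [PySem.List.pyGetD_natCast, getD_append_at pre _ [] y hpre.symm]
    rfl
  have hset2 : ∀ row' : List Int,
      PySem.List.pySetD (pre ++ cur :: rows) (y : Int) row' = pre ++ row' :: rows := by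
    intro row'
    rw [PySem.List.pySetD_natCast]
    exact set_append_cons pre _ row' rows y hpre.symm
  have hset1 : ∀ v : Int,
      PySem.List.pySetD cur (n : Int) v
        = List.replicate n 0 ++ v :: riskSuffix cave prev (y : Int) (n+1) := by
    intro v
    rw [PySem.List.pySetD_natCast, hcurdef,
        show List.replicate (n+1) (0:Int) ++ riskSuffix cave prev (y : Int) (n+1)
           = List.replicate n 0 ++ (0:Int) :: riskSuffix cave prev (y : Int) (n+1) by
          simp [List.replicate_succ']]
    exact set_append_cons _ _ _ _ n (by simp)
  have hsufn : riskSuffix cave prev (y : Int) n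
      = risk cave prev (n : Int) (y : Int) :: riskSuffix cave prev (y : Int) (n+1) :=
    riskSuffix_cons cave prev _ n hn
  have hright : (n : Int) + 1 < PySem.List.len (PySem.List.pyGetD cave 0 []) →
      PySem.List.pyGetD cur ((n : Int) + 1) 0 = risk cave prev ((n : Int) + 1) (y : Int) := by
    intro h2
    have hn1 : n + 1 < (cave.headD []).length := by rw [hW] at h2; exact_mod_cast (by omega : ((n+1 : Nat) : Int) < ((cave.headD []).length : Int))
    rw [show ((n : Int) + 1) = ((n + 1 : Nat) : Int) by push_cast; ring,
        PySem.List.pyGetD_natCast, hcurdef,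
        getD_append_at _ _ _ (n+1) (by simp),
        riskSuffix_cons cave prev _ (n+1) hn1]
    push_cast
    rfl
  have hdown : (y : Int) + 1 < PySem.List.len cave →
      PySem.List.pyGetD (PySem.List.pyGetD (pre ++ cur :: rows) ((y : Int) + 1) []) (n : Int) 0
        = risk cave prev (n : Int) ((y : Int) + 1) := by
    intro h1
    have hy1 : y + 1 < cave.length := by
      simp only [PySem.List.len_eq] at h1; exact_mod_cast h1
    have ht := hbelow hy1
    cases rows with
    | nil => simp at ht
    | cons b t =>
      simp only [List.head?_cons, Option.some.injEq] at ht
      subst ht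
      rw [show ((y : Int) + 1) = ((y + 1 : Nat) : Int) by push_cast; ring]
      simp only [PySem.List.pyGetD_natCast]
      rw [show pre ++ cur :: riskRow cave prev (((y + 1 : Nat) : Int)) :: t
             = (pre ++ [cur]) ++ riskRow cave prev (((y + 1 : Nat) : Int)) :: t by simp,
          getD_append_at _ _ [] (y+1) (by simp [hpre])]
      have hrg := riskRow_get cave prev (((y + 1 : Nat) : Int)) n hn
      rw [PySem.List.pyGetD_natCast] at hrg
      simpa using hrg
  -- now unfold one A-step and one unfolding of risk, and match the two options lists
  rw [hsufn, ← hset1 (risk cave prev (n : Int) (y : Int)),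
      ← hset2 (PySem.List.pySetD cur (n : Int) (risk cave prev (n : Int) (y : Int)))]
  simp only [aCell, hcur]
  refine congrArg _ (congrArg _ ?_)
  rw [risk.eq_def]
  by_cases h1 : (y : Int) + 1 < PySem.List.len cave <;>
    by_cases h2 : (n : Int) + 1 < PySem.List.len (PySem.List.pyGetD cave 0 [])
  · simp only [if_pos h1, if_pos h2, dif_pos h1, dif_pos h2, hdown h1, hright h2]
  · simp only [if_pos h1, if_neg h2, dif_pos h1, dif_neg h2, hdown h1]
  · simp only [if_neg h1, if_pos h2, dif_neg h1, dif_pos h2, hright h2]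
  · simp only [if_neg h1, if_neg h2, dif_neg h1, dif_neg h2]

theorem inner_simR (cave : List (List Int)) (prev : Option (List (List Int)))
    (y : Nat) (pre rows : List (List Int)) (hpre : pre.length = y)
    (hbelow : y + 1 < cave.length → rows.head? = some (riskRow cave prev ((y : Int) + 1))) :
    ∀ n, n ≤ (cave.headD []).length →
    (PySem.List.pyRange ((n : Int) - 1) (-1) (-1)).foldl (aCell cave prev (y : Int))
        (pre ++ (List.replicate n 0 ++ riskSuffix cave prev (y : Int) n) :: rows)
    = pre ++ riskRow cave prev (y : Int) :: rows := by
  intro n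
  induction n with
  | zero =>
    intro _
    rw [show ((0 : Nat) : Int) - 1 = -1 by norm_num,
        PySem.List.pyRange_neg_one_eq_nil (by omega)]
    simp [riskRow]
  | succ n ih =>
    intro hn
    rw [show (((n+1 : Nat)) : Int) - 1 = (n : Int) by push_cast; ring,
        PySem.List.pyRange_neg_one_cons (by omega : (-1 : Int) < (n : Int)),
        List.foldl_cons,
        aCell_step cave prev y pre rows hpre hbelow n (by omega)]
    exact ih (by omega)

theorem outer_simR (cave : List (List Int)) (prev : Option (List (List Int)))
    (hrect : ∀ row ∈ cave, row.length = (cave.headD []).length) :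
    ∀ m, m ≤ cave.length →
    (PySem.List.pyRange ((m : Int) - 1) (-1) (-1)).foldl
      (fun rm y =>
        (PySem.List.pyRange (PySem.List.len (PySem.List.pyGetD cave y []) - 1) (-1) (-1)).foldl
          (aCell cave prev y) rm)
      ((cave.map (fun _ => List.replicate (PySem.List.len (PySem.List.pyGetD cave 0 [])).toNat 0)).take m
        ++ rowsFrom cave prev m)
    = rowsFrom cave prev 0 := by
  have hW : (PySem.List.len (PySem.List.pyGetD cave 0 [])).toNat = (cave.headD []).length := by
    rw [hw0_eq]; simp [PySem.List.len_eq]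
  intro m
  induction m with
  | zero =>
    intro _
    rw [show ((0 : Nat) : Int) - 1 = -1 by norm_num,
        PySem.List.pyRange_neg_one_eq_nil (by omega)]
    simp
  | succ m ih =>
    intro hm
    have hm' : m < cave.length := by omega
    rw [show (((m+1 : Nat)) : Int) - 1 = (m : Int) by push_cast; ring,
        PySem.List.pyRange_neg_one_cons (by omega : (-1 : Int) < (m : Int)),
        List.foldl_cons]
    have hrange : PySem.List.pyRange (PySem.List.len (PySem.List.pyGetD cave (m : Int) []) - 1) (-1) (-1)
        = PySem.List.pyRange (((cave.headD []).length : Int) - 1) (-1) (-1) := by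
      rw [PySem.List.pyGetD_natCast, List.getD_eq_getElem cave [] hm', PySem.List.len_eq,
          hrect _ (List.getElem_mem hm')]
    have htake : (cave.map (fun _ => List.replicate (PySem.List.len (PySem.List.pyGetD cave 0 [])).toNat (0:Int))).take (m+1)
        = (cave.map (fun _ => List.replicate (PySem.List.len (PySem.List.pyGetD cave 0 [])).toNat (0:Int))).take m
          ++ [List.replicate (cave.headD []).length 0] := by
      rw [List.take_add_one]
      congr 1
      simp only [List.getElem?_map, List.getElem?_eq_getElem hm', Option.map_some, hW,
        Option.toList_some]
    have hbelow : m + 1 < cave.length →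
        (rowsFrom cave prev (m+1)).head? = some (riskRow cave prev ((m : Int) + 1)) := by
      intro h
      rw [rowsFrom_cons cave prev (m+1) h]
      simp only [List.head?_cons]
      norm_cast
    have hinner := inner_simR cave prev m
      ((cave.map (fun _ => List.replicate (PySem.List.len (PySem.List.pyGetD cave 0 [])).toNat (0:Int))).take m)
      (rowsFrom cave prev (m+1)) (by simp; omega) hbelow
      (cave.headD []).length le_rfl
    have hstate : ((cave.map (fun _ => List.replicate (PySem.List.len (PySem.List.pyGetD cave 0 [])).toNat (0:Int))).take m
          ++ [List.replicate (cave.headD []).length 0]) ++ rowsFrom cave prev (m+1)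
        = (cave.map (fun _ => List.replicate (PySem.List.len (PySem.List.pyGetD cave 0 [])).toNat (0:Int))).take m
          ++ (List.replicate (cave.headD []).length 0 ++ riskSuffix cave prev (m : Int) (cave.headD []).length)
            :: rowsFrom cave prev (m+1) := by
      rw [riskSuffix_last]; simp
    rw [htake, hrange, hstate, hinner, ← rowsFrom_cons cave prev m hm']
    exact ih (by omega)

-- ===== B-side: the memoized recursion computes risk =====
def ValidMemo (cave : List (List Int)) (prev : Option (List (List Int)))
    (memo : PySem.Dict (Int × Int) Int) : Prop :=
  ∀ x y v, PySem.Dict.get? memo (x, y) = some v → v = risk cave prev x y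

theorem meas_down (cave : List (List Int)) (x y : Int) (h : y + 1 < PySem.List.len cave) :
    riskMeasure cave x (y + 1) < riskMeasure cave x y := by
  unfold riskMeasure
  have h1 : (PySem.List.len cave - (y+1)).toNat < (PySem.List.len cave - y).toNat := by omega
  have hK : 0 < (PySem.List.len (PySem.List.pyGetD cave 0 [])).toNat + 1 := Nat.succ_pos _
  nlinarith [h1, hK]

theorem meas_right (cave : List (List Int)) (x y : Int)
    (h : x + 1 < PySem.List.len (PySem.List.pyGetD cave 0 [])) :
    riskMeasure cave (x + 1) y < riskMeasure cave x y := by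
  unfold riskMeasure
  exact Nat.add_lt_add_left (by omega) _

theorem validMemo_insert (cave : List (List Int)) (prev : Option (List (List Int)))
    (memo : PySem.Dict (Int × Int) Int) (hval : ValidMemo cave prev memo)
    (x y : Int) (v : Int) (hv : v = risk cave prev x y) :
    ValidMemo cave prev (PySem.Dict.insert memo (x, y) v) := by
  intro a b w h
  by_cases hab : (a, b) = (x, y)
  · rw [hab, PySem.Dict.get?_insert_self] at h
    obtain ⟨hax, hby⟩ := Prod.mk.injEq .. ▸ hab
    · cases h; rw [hax, hby]; exact hv
  · rw [PySem.Dict.get?_insert_of_ne _ _ hab] at h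
    exact hval a b w h

theorem bComputeF_correct (cave : List (List Int)) (prev : Option (List (List Int))) :
    ∀ (fuel : Nat) (x y : Int) (memo : PySem.Dict (Int × Int) Int),
      riskMeasure cave x y < fuel → ValidMemo cave prev memo →
      (bComputeF cave prev fuel x y memo).1 = risk cave prev x y ∧
      ValidMemo cave prev (bComputeF cave prev fuel x y memo).2 := by
  intro fuel
  induction fuel with
  | zero => intro x y memo hN _; exact absurd hN (by omega)
  | succ f ih =>
    intro x y memo hN hval
    simp only [bComputeF]
    cases hmem : PySem.Dict.get? memo (x, y) with
    | some v =>
      simp only [hmem]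
      exact ⟨hval x y v hmem, hval⟩
    | none =>
      simp only [hmem]
      by_cases h1 : y + 1 < PySem.List.len cave
      · have rec1 := ih x (y + 1) memo
          (Nat.lt_of_lt_of_le (meas_down cave x y h1) (Nat.lt_succ_iff.mp hN)) hval
        by_cases h2 : x + 1 < PySem.List.len (PySem.List.pyGetD cave 0 [])
        · have rec2 := ih (x + 1) y (bComputeF cave prev f x (y + 1) memo).2
            (Nat.lt_of_lt_of_le (meas_right cave x y h2) (Nat.lt_succ_iff.mp hN)) rec1.2
          simp only [if_pos h1, if_pos h2, rec1.1, rec2.1]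
          refine (fun hbv => ⟨hbv, validMemo_insert _ _ _ rec2.2 _ _ _ hbv⟩) ?_
          conv_rhs => rw [risk.eq_def]
          simp only [dif_pos h1, dif_pos h2]
          cases prev with
          | none => simp [pyMin_cons, List.foldl_cons, List.foldl_nil, min_def] <;> (try split_ifs) <;> (try simp only [List.foldl_cons, List.foldl_nil, min_def]) <;> (try split_ifs) <;> omega
          | some p =>
            by_cases hp : p = []
            · simp [hp, pyMin_cons, List.foldl_cons, List.foldl_nil, min_def] <;> (try split_ifs) <;> (try simp only [List.foldl_cons, List.foldl_nil, min_def]) <;> (try split_ifs) <;> omega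
            · simp [hp, pyMin_cons, List.foldl_cons, List.foldl_nil, min_def] <;> (try split_ifs) <;> (try simp only [List.foldl_cons, List.foldl_nil, min_def]) <;> (try split_ifs) <;> omega
        · simp only [if_pos h1, if_neg h2, rec1.1]
          refine (fun hbv => ⟨hbv, validMemo_insert _ _ _ rec1.2 _ _ _ hbv⟩) ?_
          conv_rhs => rw [risk.eq_def]
          simp only [dif_pos h1, dif_neg h2]
          cases prev with
          | none => simp [pyMin_cons, List.foldl_cons, List.foldl_nil, min_def] <;> (try split_ifs) <;> (try simp only [List.foldl_cons, List.foldl_nil, min_def]) <;> (try split_ifs) <;> omega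
          | some p =>
            by_cases hp : p = []
            · simp [hp, pyMin_cons, List.foldl_cons, List.foldl_nil, min_def] <;> (try split_ifs) <;> (try simp only [List.foldl_cons, List.foldl_nil, min_def]) <;> (try split_ifs) <;> omega
            · simp [hp, pyMin_cons, List.foldl_cons, List.foldl_nil, min_def] <;> (try split_ifs) <;> (try simp only [List.foldl_cons, List.foldl_nil, min_def]) <;> (try split_ifs) <;> omega
      · by_cases h2 : x + 1 < PySem.List.len (PySem.List.pyGetD cave 0 [])
        · have rec2 := ih (x + 1) y memo
            (Nat.lt_of_lt_of_le (meas_right cave x y h2) (Nat.lt_succ_iff.mp hN)) hval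
          simp only [if_neg h1, if_pos h2, rec2.1]
          refine (fun hbv => ⟨hbv, validMemo_insert _ _ _ rec2.2 _ _ _ hbv⟩) ?_
          conv_rhs => rw [risk.eq_def]
          simp only [dif_neg h1, dif_pos h2]
          cases prev with
          | none => simp [pyMin_cons, List.foldl_cons, List.foldl_nil, min_def] <;> (try split_ifs) <;> (try simp only [List.foldl_cons, List.foldl_nil, min_def]) <;> (try split_ifs) <;> omega
          | some p =>
            by_cases hp : p = []
            · simp [hp, pyMin_cons, List.foldl_cons, List.foldl_nil, min_def] <;> (try split_ifs) <;> (try simp only [List.foldl_cons, List.foldl_nil, min_def]) <;> (try split_ifs) <;> omega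
            · simp [hp, pyMin_cons, List.foldl_cons, List.foldl_nil, min_def] <;> (try split_ifs) <;> (try simp only [List.foldl_cons, List.foldl_nil, min_def]) <;> (try split_ifs) <;> omega
        · simp only [if_neg h1, if_neg h2]
          refine (fun hbv => ⟨hbv, validMemo_insert _ _ _ hval _ _ _ hbv⟩) ?_
          conv_rhs => rw [risk.eq_def]
          simp only [dif_neg h1, dif_neg h2]
          cases prev with
          | none => simp [pyMin_cons, List.foldl_cons, List.foldl_nil, min_def]
          | some p =>
            by_cases hp : p = []
            · simp [hp, pyMin_cons, List.foldl_cons, List.foldl_nil, min_def]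
            · simp [hp, pyMin_cons, List.foldl_cons, List.foldl_nil, min_def] <;> (try split_ifs) <;> (try simp only [List.foldl_cons, List.foldl_nil, min_def]) <;> (try split_ifs) <;> omega

theorem bCompute_correct (cave : List (List Int)) (prev : Option (List (List Int)))
    (x y : Int) (memo : PySem.Dict (Int × Int) Int) (hval : ValidMemo cave prev memo) :
    (bCompute cave prev x y memo).1 = risk cave prev x y ∧
    ValidMemo cave prev (bCompute cave prev x y memo).2 :=
  bComputeF_correct cave prev (riskMeasure cave x y + 1) x y memo (Nat.lt_succ_self _) hval

theorem validMemo_empty (cave : List (List Int)) (prev : Option (List (List Int))) :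
    ValidMemo cave prev PySem.Dict.empty := by
  intro a b v h
  simp [PySem.Dict.empty, PySem.Dict.get?] at h

theorem bRow_fold (cave : List (List Int)) (prev : Option (List (List Int))) (y : Int) :
    ∀ (xs : List Int) (acc : List Int) (memo : PySem.Dict (Int × Int) Int),
      ValidMemo cave prev memo →
      ((xs.foldl (fun (a : List Int × PySem.Dict (Int × Int) Int) x =>
          let r := bCompute cave prev x y a.2
          (a.1 ++ [r.1], r.2)) (acc, memo)).1
        = acc ++ xs.map (fun x => risk cave prev x y))
      ∧ ValidMemo cave prev ((xs.foldl (fun (a : List Int × PySem.Dict (Int × Int) Int) x =>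
          let r := bCompute cave prev x y a.2
          (a.1 ++ [r.1], r.2)) (acc, memo)).2) := by
  intro xs
  induction xs with
  | nil => intro acc memo h; exact ⟨by simp, h⟩
  | cons a t ih =>
    intro acc memo h
    have hc := bCompute_correct cave prev a y memo h
    simp only [List.foldl_cons, List.map_cons]
    have hrec := ih (acc ++ [(bCompute cave prev a y memo).1]) (bCompute cave prev a y memo).2 hc.2
    refine ⟨?_, hrec.2⟩
    rw [show acc ++ risk cave prev a y :: t.map (fun x => risk cave prev x y)
          = (acc ++ [risk cave prev a y]) ++ t.map (fun x => risk cave prev x y) by simp,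
        ← hc.1]
    exact hrec.1

theorem map_pyRange_risk (cave : List (List Int)) (prev : Option (List (List Int))) (y : Int) :
    (PySem.List.pyRange 0 (PySem.List.len (PySem.List.pyGetD cave 0 [])) 1).map
        (fun x => risk cave prev x y) = riskRow cave prev y := by
  rw [PySem.List.pyRange_one]
  have hW : ((PySem.List.len (PySem.List.pyGetD cave 0 []) - 0)).toNat = (cave.headD []).length := by
    rw [hw0_eq]; simp [PySem.List.len_eq]
  rw [hW, riskRow, riskSuffix]
  simp only [List.map_map, Nat.sub_zero]
  apply List.map_congr_left
  intro k _
  simp [Function.comp]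

theorem map_pyRange_rows (cave : List (List Int)) (prev : Option (List (List Int))) :
    (PySem.List.pyRange 0 (PySem.List.len cave) 1).map
        (fun y => riskRow cave prev y) = rowsFrom cave prev 0 := by
  rw [PySem.List.pyRange_one]
  have hL : ((PySem.List.len cave - 0)).toNat = cave.length := by simp [PySem.List.len_eq]
  rw [hL, rowsFrom]
  simp only [List.map_map, Nat.sub_zero]
  apply List.map_congr_left
  intro k _
  simp [Function.comp]

theorem bRows_fold (cave : List (List Int)) (prev : Option (List (List Int))) :
    ∀ (ys : List Int) (acc : List (List Int)) (memo : PySem.Dict (Int × Int) Int),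
      ValidMemo cave prev memo →
      ((ys.foldl (fun (st : List (List Int) × PySem.Dict (Int × Int) Int) y =>
          let rowst :=
            (PySem.List.pyRange 0 (PySem.List.len (PySem.List.pyGetD cave 0 [])) 1).foldl
              (fun (a : List Int × PySem.Dict (Int × Int) Int) x =>
                let r := bCompute cave prev x y a.2
                (a.1 ++ [r.1], r.2)) ([], st.2)
          (st.1 ++ [rowst.1], rowst.2)) (acc, memo)).1
        = acc ++ ys.map (fun y => riskRow cave prev y))
      ∧ ValidMemo cave prev ((ys.foldl (fun (st : List (List Int) × PySem.Dict (Int × Int) Int) y =>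
          let rowst :=
            (PySem.List.pyRange 0 (PySem.List.len (PySem.List.pyGetD cave 0 [])) 1).foldl
              (fun (a : List Int × PySem.Dict (Int × Int) Int) x =>
                let r := bCompute cave prev x y a.2
                (a.1 ++ [r.1], r.2)) ([], st.2)
          (st.1 ++ [rowst.1], rowst.2)) (acc, memo)).2) := by
  intro ys
  induction ys with
  | nil => intro acc memo h; exact ⟨by simp, h⟩
  | cons a t ih =>
    intro acc memo h
    have hrow := bRow_fold cave prev a
      (PySem.List.pyRange 0 (PySem.List.len (PySem.List.pyGetD cave 0 [])) 1) [] memo h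
    have hrv : ((PySem.List.pyRange 0 (PySem.List.len (PySem.List.pyGetD cave 0 [])) 1).foldl
        (fun (a_1 : List Int × PySem.Dict (Int × Int) Int) x =>
          let r := bCompute cave prev x a a_1.2
          (a_1.1 ++ [r.1], r.2)) ([], memo)).1 = riskRow cave prev a := by
      rw [hrow.1, List.nil_append, map_pyRange_risk]
    simp only [List.foldl_cons, List.map_cons]
    have hrec := ih (acc ++ [((PySem.List.pyRange 0 (PySem.List.len (PySem.List.pyGetD cave 0 [])) 1).foldl
              (fun (a_1 : List Int × PySem.Dict (Int × Int) Int) x =>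
                let r := bCompute cave prev x a a_1.2
                (a_1.1 ++ [r.1], r.2)) ([], memo)).1])
      ((PySem.List.pyRange 0 (PySem.List.len (PySem.List.pyGetD cave 0 [])) 1).foldl
              (fun (a_1 : List Int × PySem.Dict (Int × Int) Int) x =>
                let r := bCompute cave prev x a a_1.2
                (a_1.1 ++ [r.1], r.2)) ([], memo)).2 hrow.2
    refine ⟨?_, hrec.2⟩
    rw [show acc ++ riskRow cave prev a :: t.map (fun y => riskRow cave prev y)
          = (acc ++ [riskRow cave prev a]) ++ t.map (fun y => riskRow cave prev y) by simp,
        ← hrv]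
    exact hrec.1

-- ===== VERDICT (by name: the statement is the Claim_ definition above) =====
theorem low_total_risk_map_spec : Claim_equal_low_total_risk_map := by
  intro cave prev _hdom hpre
  obtain ⟨hrect, -⟩ := hpre
  show low_total_risk_map cave prev = low_total_risk_map_alt cave prev
  have hA : low_total_risk_map cave prev = rowsFrom cave prev 0 := by
    have h := outer_simR cave prev hrect cave.length le_rfl
    simp only [low_total_risk_map]
    rw [show (cave.map (fun _ => List.replicate (PySem.List.len (PySem.List.pyGetD cave 0 [])).toNat (0:Int)))
          = (cave.map (fun _ => List.replicate (PySem.List.len (PySem.List.pyGetD cave 0 [])).toNat (0:Int))).take cave.length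
            ++ rowsFrom cave prev cave.length by rw [rowsFrom_last]; simp]
    simpa [PySem.List.len_eq] using h
  have hB : low_total_risk_map_alt cave prev = rowsFrom cave prev 0 := by
    have h := bRows_fold cave prev ((PySem.List.pyRange 0 (PySem.List.len cave) 1).reverse)
      [] PySem.Dict.empty (validMemo_empty cave prev)
    simp only [low_total_risk_map_alt]
    rw [h.1, List.nil_append, ← List.map_reverse, List.reverse_reverse, map_pyRange_rows]
  rw [hA, hB]
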